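-- pv_equiv track=rewrite | github.com/Philosoft/leetcode-practice-python | 2016__maximum_difference_between_increasing_elements.py | maximumDifferenceBrute
-- ===== SOURCE A (Python) =====
-- from typing import List
--
-- def maximumDifferenceBrute(nums: List[int]) -> int:
--     """
--     brute force solution
--     O(N ** 2)
--     """
--     diff = -1
--     for i in range(len(nums) - 1):
--         for j in range(i + 1, len(nums)):
--             d = nums[j] - nums[i]
--             if d > 0 and d > diff:
--                 diff = d
--
--     return diff
-- ===== SOURCE B (Python) =====
-- from typing import List
--
-- def maximumDifferenceBrute(nums: List[int]) -> int:
--     """one pass: track the running minimum of the prefix, O(N)"""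
--     diff = -1
--     if not nums:
--         return diff
--     mn = nums[0]
--     for y in nums[1:]:
--         if y > mn:
--             if y - mn > diff:
--                 diff = y - mn
--         else:
--             mn = y
--     return diff
-- ===== Notes on version B (the rewrite author's own statement) =====
-- stated objective: faster
-- what changed: replaced the nested all-pairs scan with a single pass keeping the running prefix minimum and the best positive difference
import Mathlib
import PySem

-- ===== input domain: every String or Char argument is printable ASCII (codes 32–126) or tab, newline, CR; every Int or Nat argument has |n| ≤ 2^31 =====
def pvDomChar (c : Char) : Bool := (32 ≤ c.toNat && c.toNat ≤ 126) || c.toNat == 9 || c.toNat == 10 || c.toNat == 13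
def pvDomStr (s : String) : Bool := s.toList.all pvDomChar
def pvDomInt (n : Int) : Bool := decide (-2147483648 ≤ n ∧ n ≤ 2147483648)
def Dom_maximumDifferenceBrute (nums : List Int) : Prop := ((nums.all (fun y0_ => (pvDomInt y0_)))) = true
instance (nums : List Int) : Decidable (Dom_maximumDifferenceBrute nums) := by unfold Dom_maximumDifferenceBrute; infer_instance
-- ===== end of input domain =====

-- B replaces A's O(n^2) all-pairs scan with a single pass over the list tracking the
-- running prefix minimum and the best positive difference.


-- ===== PORT A =====
-- literal transliteration of A: for i in range(len(nums)-1): for j in range(i+1, len(nums)): …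
def maximumDifferenceBrute (nums : List Int) : Int :=
  (PySem.List.pyRange 0 ((nums.length : Int) - 1) 1).foldl
    (fun diff i =>
      (PySem.List.pyRange (i + 1) (nums.length : Int) 1).foldl
        (fun diff j =>
          let d := PySem.List.pyGetD nums j 0 - PySem.List.pyGetD nums i 0
          if 0 < d ∧ diff < d then d else diff)
        diff)
    (-1)

-- ===== PORT B =====
-- literal transliteration of Source B: state (mn, diff), one pass over nums[1:]
def maximumDifferenceBrute_alt (nums : List Int) : Int :=
  match nums with
  | [] => -1
  | x :: rest =>
      (rest.foldl
        (fun (s : Int × Int) y =>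
          if s.1 < y then (s.1, if s.2 < y - s.1 then y - s.1 else s.2)
          else (y, s.2))
        (x, -1)).2

-- ===== PRECONDITION & SPEC =====
def Spec_maximumDifferenceBrute (nums : List Int) (out : Int) : Prop := out = maximumDifferenceBrute_alt nums
instance (nums : List Int) (out : Int) : Decidable (Spec_maximumDifferenceBrute nums out) := by unfold Spec_maximumDifferenceBrute; infer_instance

-- ===== CLAIM (what is proved, stated in full; the proofs are below) =====
def Claim_equal_maximumDifferenceBrute : Prop := ∀ (nums : List Int), Dom_maximumDifferenceBrute nums → Spec_maximumDifferenceBrute nums (maximumDifferenceBrute nums)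

-- ===== LEMMAS AND PROOFS =====

-- A's inner loop over j, as a structural fold over the suffix
def pvInner (x : Int) (ys : List Int) (d : Int) : Int :=
  ys.foldl (fun dd y => if 0 < y - x ∧ dd < y - x then y - x else dd) d

-- A's outer loop over i, structurally
def pvOuter : List Int → Int → Int
  | [], d => d
  | x :: ys, d => pvOuter ys (pvInner x ys d)

-- best positive difference y - x for y ∈ ys (else -1)
def pvIBest (x : Int) : List Int → Int
  | [] => -1
  | y :: ys => max (if 0 < y - x then y - x else -1) (pvIBest x ys)

-- best positive pair difference in the whole list (else -1)
def pvBest : List Int → Int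
  | [] => -1
  | x :: ys => max (pvIBest x ys) (pvBest ys)

-- best difference found by B's prefix-minimum pass, starting from minimum mn
def pvGBest (mn : Int) : List Int → Int
  | [] => -1
  | y :: ys => if mn < y then max (y - mn) (pvGBest mn ys) else pvGBest y ys

lemma pvIBest_ge (x : Int) (ys : List Int) : -1 ≤ pvIBest x ys := by
  induction ys with
  | nil => simp [pvIBest]
  | cons y ys ih => simp only [pvIBest]; split_ifs <;> omega

lemma pvBest_ge (ys : List Int) : -1 ≤ pvBest ys := by
  induction ys with
  | nil => simp [pvBest]
  | cons y ys ih => have := pvIBest_ge y ys; simp only [pvBest]; omega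

lemma pvIBest_mono {a b : Int} (h : a ≤ b) (ys : List Int) :
    pvIBest b ys ≤ pvIBest a ys := by
  induction ys with
  | nil => simp [pvIBest]
  | cons y ys ih => simp only [pvIBest]; split_ifs <;> omega

lemma pvInner_eq (x : Int) (ys : List Int) (d : Int) (hd : -1 ≤ d) :
    pvInner x ys d = max d (pvIBest x ys) := by
  induction ys generalizing d with
  | nil => simp [pvInner, pvIBest]; omega
  | cons y ys ih =>
      have hstep : (if 0 < y - x ∧ d < y - x then y - x else d)
          = max d (if 0 < y - x then y - x else -1) := by split_ifs <;> omega
      have hd' : -1 ≤ (if 0 < y - x ∧ d < y - x then y - x else d) := by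
        split_ifs <;> omega
      simp only [pvInner, List.foldl_cons] at *
      rw [ih _ hd', hstep, pvIBest]
      omega

lemma pvOuter_eq (l : List Int) (d : Int) (hd : -1 ≤ d) :
    pvOuter l d = max d (pvBest l) := by
  induction l generalizing d with
  | nil => simp [pvOuter, pvBest]; omega
  | cons x ys ih =>
      have h1 := pvInner_eq x ys d hd
      have h2 := pvIBest_ge x ys
      rw [pvOuter, ih _ (by omega), h1, pvBest]
      omega

lemma pvGBest_eq (mn : Int) (ys : List Int) :
    pvGBest mn ys = max (pvIBest mn ys) (pvBest ys) := by
  induction ys generalizing mn with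
  | nil => simp [pvGBest, pvIBest, pvBest]
  | cons y ys ih =>
      simp only [pvGBest, pvIBest, pvBest]
      by_cases h : mn < y
      · have hm := pvIBest_mono (le_of_lt h) ys
        rw [if_pos h, ih mn, if_pos (by omega)]
        omega
      · have hm := pvIBest_mono (le_of_not_gt h) ys
        have := pvIBest_ge mn ys
        rw [if_neg h, ih y, if_neg (by omega)]
        omega

-- B's fold computes max d (pvGBest mn ys)
lemma pvB_fold_eq (ys : List Int) (mn d : Int) (hd : -1 ≤ d) :
    (ys.foldl
      (fun (s : Int × Int) y =>
        if s.1 < y then (s.1, if s.2 < y - s.1 then y - s.1 else s.2)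
        else (y, s.2))
      (mn, d)).2 = max d (pvGBest mn ys) := by
  induction ys generalizing mn d with
  | nil => simp [pvGBest]; omega
  | cons y ys ih =>
      simp only [List.foldl_cons, pvGBest]
      by_cases h : mn < y
      · rw [if_pos h]
        have : (if d < y - mn then y - mn else d) = max d (y - mn) := by
          split_ifs <;> omega
        rw [this, ih _ _ (by omega)]
        omega
      · rw [if_neg h, ih _ _ hd, if_neg h]

-- A's nested index loops equal pvOuter on the dropped suffix
lemma pvA_outer (nums : List Int) (a d : Int) (ha : 0 ≤ a) :
    (PySem.List.pyRange a ((nums.length : Int) - 1) 1).foldl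
      (fun diff i =>
        (PySem.List.pyRange (i + 1) (nums.length : Int) 1).foldl
          (fun diff j =>
            let dd := PySem.List.pyGetD nums j 0 - PySem.List.pyGetD nums i 0
            if 0 < dd ∧ diff < dd then dd else diff)
          diff)
      d = pvOuter (nums.drop a.toNat) d := by
  by_cases hend : (nums.length : Int) - 1 ≤ a
  · rw [PySem.List.pyRange_one_eq_nil hend]
    have hlen : (nums.drop a.toNat).length ≤ 1 := by
      simp only [List.length_drop]; omega
    match hdrop : nums.drop a.toNat with
    | [] => simp [pvOuter]
    | [x] => simp [pvOuter, pvInner]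
    | x :: y :: t => rw [hdrop] at hlen; simp at hlen
  · push Not at hend
    rw [PySem.List.pyRange_one_cons (by omega), List.foldl_cons]
    have hlt : a.toNat < nums.length := by omega
    have hx : PySem.List.pyGetD nums a 0 = nums[a.toNat] :=
      PySem.List.pyGetD_eq_getElem nums 0 ha (by omega)
    have hinner : ∀ d0 : Int,
        (PySem.List.pyRange (a + 1) (nums.length : Int) 1).foldl
          (fun diff j =>
            let dd := PySem.List.pyGetD nums j 0 - PySem.List.pyGetD nums a 0
            if 0 < dd ∧ diff < dd then dd else diff)
          d0 = pvInner nums[a.toNat] (nums.drop (a + 1).toNat) d0 := by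
      intro d0
      rw [PySem.List.foldl_pyRange_pyGetD' nums 0
        (fun acc y => if 0 < y - PySem.List.pyGetD nums a 0 ∧ acc < y - PySem.List.pyGetD nums a 0
          then y - PySem.List.pyGetD nums a 0 else acc) d0 (a := a + 1) (by omega)]
      rw [pvInner, hx]
    have hdrop : nums.drop a.toNat = nums[a.toNat] :: nums.drop (a.toNat + 1) :=
      (List.getElem_cons_drop hlt).symm
    have htn : (a + 1).toNat = a.toNat + 1 := by omega
    rw [hinner, hdrop, pvOuter, ← htn]
    exact pvA_outer nums (a + 1) _ (by omega)
termination_by ((nums.length : Int) - a).toNat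
decreasing_by omega

lemma pvA_eq (nums : List Int) : maximumDifferenceBrute nums = pvOuter nums (-1) := by
  have := pvA_outer nums 0 (-1) le_rfl
  simpa [maximumDifferenceBrute] using this

-- ===== VERDICT (by name: the statement is the Claim_ definition above) =====
theorem maximumDifferenceBrute_spec : Claim_equal_maximumDifferenceBrute := by
  intro nums _
  unfold Spec_maximumDifferenceBrute
  rw [pvA_eq]
  match nums with
  | [] => simp [pvOuter, maximumDifferenceBrute_alt]
  | x :: rest =>
      rw [pvOuter, maximumDifferenceBrute_alt,
        pvB_fold_eq rest x (-1) le_rfl,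
        pvInner_eq x rest (-1) le_rfl,
        pvOuter_eq rest _ (by have := pvIBest_ge x rest; omega),
        pvGBest_eq]
      have := pvIBest_ge x rest
      have := pvBest_ge rest
      omega
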